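-- pv_equiv track=rewrite | github.com/teenorth/csv-reviewer | api/util/__init__.py | accept_keys_message
-- ===== SOURCE A (Python) =====
-- def accept_keys_message(data, keys):
--     '''Creates a message containing all the keys not
--     meant to be in a dictionary
--
--     Parameters:
--       data (dictionary): Dataset to validate
--       keys (array): Keys to validate against
--
--     Returns:
--       String
--     '''
--     not_accepted = [key for key in data if key not in keys]
--
--     if len(not_accepted) == 1:
--         return f'{not_accepted[0]} are not accepted on the request'
--     if len(not_accepted) == 2:
--         return (
--             f'{not_accepted[0]} and {not_accepted[1]} are not accepted on the request'
--         )
--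
--     message = ''
--     for idx, key in enumerate(not_accepted):
--         if idx + 2 == len(not_accepted):
--             message += (
--                 f'{key} and {not_accepted[idx + 1]} are not accepted on the request'
--             )
--             break
--         else:
--             message += f'{key}, '
--
--     return message
-- ===== SOURCE B (Python) =====
-- def accept_keys_message(data, keys):
--     not_accepted = [key for key in data if key not in keys]
--     if not not_accepted:
--         return ''
--     if len(not_accepted) == 1:
--         return f'{not_accepted[0]} are not accepted on the request'
--     return f"{', '.join(not_accepted[:-1])} and {not_accepted[-1]} are not accepted on the request"
-- ===== Notes on version B (the rewrite author's own statement) =====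
-- stated objective: simpler
-- what changed: Replaces the enumerate/idx+2/break accumulation loop and the special len==2 branch with guard clauses plus a single ', '.join of all-but-last followed by ' and ' plus the last key, collapsing the 2-element and n>=3 cases into one branch.
import Mathlib
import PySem

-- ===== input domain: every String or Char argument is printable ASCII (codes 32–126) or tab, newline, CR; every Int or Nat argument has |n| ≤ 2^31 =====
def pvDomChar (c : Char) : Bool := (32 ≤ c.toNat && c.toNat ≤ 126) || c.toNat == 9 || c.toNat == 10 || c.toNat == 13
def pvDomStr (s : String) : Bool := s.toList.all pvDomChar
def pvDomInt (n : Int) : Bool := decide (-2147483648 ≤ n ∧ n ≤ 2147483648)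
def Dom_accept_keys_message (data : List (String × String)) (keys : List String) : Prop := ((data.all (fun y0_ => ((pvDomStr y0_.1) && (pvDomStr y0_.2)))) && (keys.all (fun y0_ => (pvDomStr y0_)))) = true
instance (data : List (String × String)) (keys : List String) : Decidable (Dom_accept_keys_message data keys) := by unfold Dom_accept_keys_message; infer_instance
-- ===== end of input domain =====

-- B replaces A's enumerate/idx+2/break loop and the special two-element branch with
-- guard clauses plus a single ', '.join of all-but-last followed by the last key (objective: simpler).

-- ===== PORT A =====
-- the 'for idx, key in enumerate(not_accepted): …' loop with its break;
-- 'full' is the whole list (for the len(...) test and the [idx+1] lookup)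
def aksLoop (full : List String) (idx : Nat) (rest : List String) (msg : String) : String :=
  match rest with
  | [] => msg
  | key :: tail =>
    if idx + 2 = full.length then
      msg ++ key ++ " and " ++ (PySem.List.pyGetD full ((idx : Int) + 1) "")
        ++ " are not accepted on the request"
    else
      aksLoop full (idx + 1) tail (msg ++ key ++ ", ")

def accept_keys_message (data : List (String × String)) (keys : List String) : String :=
  -- 'for key in data' iterates the dict's (distinct) keys in first-occurrence order
  let not_accepted := (PySem.List.dedup (data.map Prod.fst)).filter (fun key => !(keys.contains key))
  if not_accepted.length = 1 then
    PySem.List.pyGetD not_accepted 0 "" ++ " are not accepted on the request"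
  else if not_accepted.length = 2 then
    PySem.List.pyGetD not_accepted 0 "" ++ " and " ++ PySem.List.pyGetD not_accepted 1 ""
      ++ " are not accepted on the request"
  else
    aksLoop not_accepted 0 not_accepted ""

-- ===== PORT B =====
def accept_keys_message_alt (data : List (String × String)) (keys : List String) : String :=
  let not_accepted := (PySem.List.dedup (data.map Prod.fst)).filter (fun key => !(keys.contains key))
  if not_accepted.isEmpty then ""
  else if not_accepted.length = 1 then
    PySem.List.pyGetD not_accepted 0 "" ++ " are not accepted on the request"
  else
    PySem.Str.join ", " (PySem.List.slice not_accepted none (some (-1)))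
      ++ " and " ++ PySem.List.pyGetD not_accepted (-1) ""
      ++ " are not accepted on the request"

-- ===== PRECONDITION & SPEC =====
def Spec_accept_keys_message (data : List (String × String)) (keys : List String) (out : String) : Prop := out = accept_keys_message_alt data keys
instance (data : List (String × String)) (keys : List String) (out : String) : Decidable (Spec_accept_keys_message data keys out) := by unfold Spec_accept_keys_message; infer_instance

-- ===== CLAIM (what is proved, stated in full; the proofs are below) =====
def Claim_equal_accept_keys_message : Prop := ∀ (data : List (String × String)) (keys : List String), Dom_accept_keys_message data keys → Spec_accept_keys_message data keys (accept_keys_message data keys)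

-- ===== LEMMAS AND PROOFS =====

theorem aks_join_singleton (a : String) : PySem.Str.join ", " [a] = a := by
  apply String.toList_injective
  simp [PySem.Str.toList_join, PySem.Chars.join_singleton]

theorem aks_join_cons (a b : String) (l : List String) :
    PySem.Str.join ", " (a :: b :: l) = a ++ ", " ++ PySem.Str.join ", " (b :: l) := by
  apply String.toList_injective
  simp [PySem.Str.toList_join, PySem.Chars.join_cons_cons]

-- the A-side loop, started after 'acc', produces B's join-shaped message
theorem aksLoop_eq (rest : List String) : ∀ (acc : List String) (msg : String),
    2 ≤ rest.length →
    aksLoop (acc ++ rest) acc.length rest msg =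
      msg ++ PySem.Str.join ", " rest.dropLast ++ " and " ++ rest.getLastD ""
        ++ " are not accepted on the request" := by
  induction rest with
  | nil => intro _ _ h; simp at h
  | cons k t ih =>
    intro acc msg h
    match t with
    | [] => simp at h
    | [k2] =>
      rw [aksLoop]
      rw [if_pos (by simp)]
      have h1 : ((acc.length : Int) + 1) = ((acc.length + 1 : Nat) : Int) := by push_cast; ring
      rw [h1, PySem.List.pyGetD_natCast]
      have h2 : (acc ++ [k, k2]).getD (acc.length + 1) "" = k2 := by
        simp [List.getD]
      rw [h2]
      apply String.toList_injective
      simp [aks_join_singleton]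
    | k2 :: k3 :: t3 =>
      have hfull : (acc ++ k :: k2 :: k3 :: t3) = (acc ++ [k]) ++ (k2 :: k3 :: t3) := by simp
      rw [aksLoop]
      rw [if_neg (by simp)]
      have hlen : acc.length + 1 = (acc ++ [k]).length := by simp
      rw [hfull, hlen, ih (acc ++ [k]) (msg ++ k ++ ", ") (by simp)]
      simp only [List.dropLast_cons₂, List.getLastD_cons, aks_join_cons]
      apply String.toList_injective
      simp

theorem accept_keys_message_spec' (data : List (String × String)) (keys : List String) :
    accept_keys_message data keys = accept_keys_message_alt data keys := by
  unfold accept_keys_message accept_keys_message_alt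
  generalize (PySem.List.dedup (data.map Prod.fst)).filter (fun key => !(keys.contains key)) = na
  match na with
  | [] => simp [aksLoop]
  | [a] => simp
  | [a, b] =>
    dsimp only
    rw [if_neg (show ¬([a, b].length = 1) by simp), if_pos (show ([a, b].length = 2) from rfl),
        if_neg (show ¬([a, b].isEmpty = true) by simp), if_neg (show ¬([a, b].length = 1) by simp)]
    rw [PySem.List.slice_to_neg_one, PySem.List.pyGetD_neg_one _ "" (by simp : (a :: [b]) ≠ [])]
    apply String.toList_injective
    simp [PySem.List.pyGetD, PySem.List.pyGet?, PySem.List.pyIdx?, aks_join_singleton]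
  | a :: b :: c :: t =>
    have hne : (a :: b :: c :: t : List String) ≠ [] := by simp
    dsimp only
    rw [if_neg (show ¬((a :: b :: c :: t).length = 1) by simp),
        if_neg (show ¬((a :: b :: c :: t).length = 2) by simp),
        if_neg (show ¬((a :: b :: c :: t).isEmpty = true) by simp),
        if_neg (show ¬((a :: b :: c :: t).length = 1) by simp)]
    have := aksLoop_eq (a :: b :: c :: t) [] "" (by simp)
    simp only [List.nil_append, List.length_nil] at this
    rw [this, PySem.List.slice_to_neg_one, PySem.List.pyGetD_neg_one _ _ hne]
    have hlast : (a :: b :: c :: t).getLastD "" = (a :: b :: c :: t).getLast hne := by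
      rw [List.getLastD_eq_getLast?, List.getLast?_eq_some_getLast hne]; rfl
    rw [← hlast]
    apply String.toList_injective
    simp

-- ===== VERDICT (by name: the statement is the Claim_ definition above) =====
theorem accept_keys_message_spec : Claim_equal_accept_keys_message := by
  intro data keys _
  exact accept_keys_message_spec' data keys
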